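-- pv_equiv track=rewrite | github.com/Mendoza-Matias/Algoritmos | tp-cuatro-recursividad/tp-cuatro.py | colocarBaldosas
-- ===== SOURCE A (Python) =====
-- def colocarBaldosas(dias:int) -> int:
--
--     baldosas = 0
--
--     if(dias == 1):
--
--         baldosas = 100
--
--     elif(dias % 2 == 0):
--
--         baldosas = 2 * colocarBaldosas(dias - 1)
--
--     elif(dias % 2 != 0 and dias != 1):
--
--         baldosas = colocarBaldosas(dias - 1) + colocarBaldosas(dias - 2 )
--
--     else:
--         baldosas = colocarBaldosas(dias - 1)
--
--     return baldosas
-- ===== SOURCE B (Python) =====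
-- def colocarBaldosas(dias: int) -> int:
--     # Bottom-up iteration: keep (f(i-1), f(i)); f(1)=100, even day doubles,
--     # odd day adds the two previous days.  O(dias) instead of exponential recursion.
--     prev, cur = 0, 100
--     for i in range(2, dias + 1):
--         if i % 2 == 0:
--             prev, cur = cur, 2 * cur
--         else:
--             prev, cur = cur, cur + prev
--     return cur
-- ===== Notes on version B (the rewrite author's own statement) =====
-- stated objective: faster
-- what changed: Replaced A's exponential double recursion by a single bottom-up loop that keeps only the last two values (f(i-1), f(i)).
-- outside the precondition, e.g. on colocarBaldosas(0): A raises RecursionError, B returns 100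
import Mathlib
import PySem

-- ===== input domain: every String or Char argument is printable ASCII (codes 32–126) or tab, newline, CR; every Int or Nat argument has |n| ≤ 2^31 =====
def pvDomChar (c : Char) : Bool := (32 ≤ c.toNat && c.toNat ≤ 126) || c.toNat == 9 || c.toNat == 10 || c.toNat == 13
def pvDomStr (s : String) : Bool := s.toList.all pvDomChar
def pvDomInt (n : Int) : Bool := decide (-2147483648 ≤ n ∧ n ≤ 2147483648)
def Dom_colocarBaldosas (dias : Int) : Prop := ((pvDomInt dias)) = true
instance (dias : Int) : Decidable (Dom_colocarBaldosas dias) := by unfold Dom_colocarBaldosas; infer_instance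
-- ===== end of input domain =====

-- B replaces A's exponential double recursion by one bottom-up pass keeping the last
-- two values (objective: faster, asymptotic).

-- ===== PORT A =====
-- literal port of A's recursion; the 'dias ≤ 0' guard only totalises the port:
-- Python recurses forever there (RecursionError), excluded by Pre_.
def colocarBaldosas (dias : Int) : Int :=
  if _h0 : dias ≤ 0 then 0
  else if dias = 1 then 100
  else if dias % 2 = 0 then 2 * colocarBaldosas (dias - 1)
  else colocarBaldosas (dias - 1) + colocarBaldosas (dias - 2)
termination_by dias.toNat
decreasing_by all_goals omega

-- ===== PORT B =====
def colocarBaldosas_alt (dias : Int) : Int :=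
  ((PySem.List.pyRange 2 (dias + 1) 1).foldl
    (fun (s : Int × Int) i => if i % 2 = 0 then (s.2, 2 * s.2) else (s.2, s.2 + s.1))
    (0, 100)).2

-- ===== PRECONDITION & SPEC =====
-- Python A recurses without end for dias ≤ 0 (RecursionError); Pre_ keeps dias ≥ 1.
def Pre_colocarBaldosas (dias : Int) : Prop := 1 ≤ dias
instance (dias : Int) : Decidable (Pre_colocarBaldosas dias) := by unfold Pre_colocarBaldosas; infer_instance
def pvWitness_colocarBaldosas : Int := (7)

def Spec_colocarBaldosas (dias : Int) (out : Int) : Prop := out = colocarBaldosas_alt dias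
instance (dias : Int) (out : Int) : Decidable (Spec_colocarBaldosas dias out) := by unfold Spec_colocarBaldosas; infer_instance

-- ===== CLAIM (what is proved, stated in full; the proofs are below) =====
def Claim_equal_colocarBaldosas : Prop := ∀ (dias : Int), Dom_colocarBaldosas dias → Pre_colocarBaldosas dias → Spec_colocarBaldosas dias (colocarBaldosas dias)

-- ===== LEMMAS AND PROOFS =====

lemma pvStep_loop (n : Nat) (h : 1 ≤ n) :
    (PySem.List.pyRange 2 ((n : Int) + 1) 1).foldl
      (fun (s : Int × Int) i => if i % 2 = 0 then (s.2, 2 * s.2) else (s.2, s.2 + s.1))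
      (0, 100)
    = (if n = 1 then 0 else colocarBaldosas ((n : Int) - 1), colocarBaldosas (n : Int)) := by
  induction n with
  | zero => omega
  | succ m ih =>
    by_cases hm : m = 0
    · subst hm
      rw [PySem.List.pyRange_one_eq_nil (by norm_num)]
      simp [colocarBaldosas]
    · have hm1 : 1 ≤ m := by omega
      have hc : ((m + 1 : Nat) : Int) = (m : Int) + 1 := by push_cast; ring
      have hsplit : PySem.List.pyRange 2 (((m + 1 : Nat) : Int) + 1) 1
          = PySem.List.pyRange 2 ((m : Int) + 1) 1 ++ [(m : Int) + 1] := by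
        have := PySem.List.pyRange_one_succ_right (a := 2) (b := (m : Int) + 1) (by omega)
        push_cast
        push_cast at this
        exact this
      rw [hsplit, List.foldl_append, ih hm1]
      simp only [List.foldl_cons, List.foldl_nil, hc]
      have e1 : (m : Int) + 1 - 1 = (m : Int) := by ring
      have e2 : (m : Int) + 1 - 2 = (m : Int) - 1 := by ring
      have hA : colocarBaldosas ((m : Int) + 1)
          = if ((m : Int) + 1) % 2 = 0 then 2 * colocarBaldosas ((m : Int))
            else colocarBaldosas ((m : Int)) + colocarBaldosas ((m : Int) - 1) := by
        rw [colocarBaldosas]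
        rw [dif_neg (show ¬ ((m : Int) + 1) ≤ 0 by omega), if_neg (show ((m : Int) + 1) ≠ 1 by omega),
            e1, e2]
      rw [if_neg (show m + 1 ≠ 1 by omega), e1, hA]
      by_cases hpar : ((m : Int) + 1) % 2 = 0
      · rw [if_pos hpar, if_pos hpar]
      · have hmne1 : m ≠ 1 := by omega
        rw [if_neg hpar, if_neg hpar, if_neg hmne1]

theorem colocarBaldosas_spec : Claim_equal_colocarBaldosas := by
  intro dias _hd hpre
  unfold Pre_colocarBaldosas at hpre
  unfold Spec_colocarBaldosas colocarBaldosas_alt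
  have hn : dias = ((dias.toNat : Nat) : Int) := by omega
  rw [hn, pvStep_loop dias.toNat (by omega)]
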